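-- pv_equiv track=rewrite | github.com/Panniantong/agent-eyes | agent_eyes/search/twitter.py | _parse_birdx_text
-- ===== SOURCE A (Python) =====
-- from typing import Any, Dict, List, Optional
--
-- def _parse_birdx_text(text: str) -> List[Dict[str, Any]]:
--     """Parse birdx plain text output into structured data."""
--     results = []
--     current = {}
--     for line in text.strip().split("\n"):
--         line = line.strip()
--         if not line:
--             if current:
--                 results.append(current)
--                 current = {}
--             continue
--         if line.startswith("@"):
--             current["author"] = line.split()[0] if line else ""
--         elif line.startswith("http"):
--             current["url"] = line
--         else:
--             current["text"] = current.get("text", "") + " " + line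
--     if current:
--         results.append(current)
--     return results
-- ===== SOURCE B (Python) =====
-- from typing import Any, Dict, List, Optional
--
--
-- def _parse_block(lines):
--     """Fold one block of non-blank lines into a tweet dict."""
--     tweet = {}
--     for line in lines:
--         if line.startswith("@"):
--             tweet["author"] = line.split()[0]
--         elif line.startswith("http"):
--             tweet["url"] = line
--         else:
--             tweet["text"] = tweet.get("text", "") + " " + line
--     return tweet
--
--
-- def _parse_birdx_text(text: str) -> List[Dict[str, Any]]:
--     """Parse birdx plain text output into structured data.
--
--     Two phases: group the stripped lines into blank-separated blocks,
--     then parse each block independently into a tweet dict."""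
--     blocks = []
--     block = []
--     for raw in text.strip().split("\n"):
--         line = raw.strip()
--         if line:
--             block.append(line)
--         elif block:
--             blocks.append(block)
--             block = []
--     if block:
--         blocks.append(block)
--     return [_parse_block(b) for b in blocks]
-- ===== Notes on version B (the rewrite author's own statement) =====
-- stated objective: alternative
-- what changed: Replaces A's single flush-on-blank loop that mutates a tweet dict inline with a two-phase group-then-parse pass: lines are first grouped into blank-separated blocks, then each block is independently folded into its tweet dict.
import Mathlib
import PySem

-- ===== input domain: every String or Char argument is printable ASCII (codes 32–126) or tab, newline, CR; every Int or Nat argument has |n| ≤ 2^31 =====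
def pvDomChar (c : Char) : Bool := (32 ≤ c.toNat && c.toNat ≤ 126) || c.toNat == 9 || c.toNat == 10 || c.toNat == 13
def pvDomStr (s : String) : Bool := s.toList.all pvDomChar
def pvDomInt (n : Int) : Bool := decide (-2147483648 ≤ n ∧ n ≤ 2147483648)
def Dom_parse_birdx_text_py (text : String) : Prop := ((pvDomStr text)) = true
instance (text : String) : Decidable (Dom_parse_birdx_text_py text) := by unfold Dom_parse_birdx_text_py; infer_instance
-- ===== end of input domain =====

-- B replaces A's flush-on-blank accumulator loop with a two-phase group-then-parse pass (same cost; alternative decomposition).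

-- ===== PORT A =====
-- A's loop body applied to the already-stripped line (Python strips at the top of the loop body).
def pvAStep (st : List (List (String × String)) × PySem.Dict String String) (line : String) :
    List (List (String × String)) × PySem.Dict String String :=
  let results := st.1
  let current := st.2
  if line = "" then
    -- 'if not line: if current: results.append(current); current = {}'
    if current.items = [] then (results, current) else (results ++ [current.items], PySem.Dict.empty)
  else if PySem.Str.startswith line "@" then
    -- line.split()[0] : line is non-empty here, so split() is non-empty and [0] is its head (exact)
    (results, current.insert "author" (if line ≠ "" then (PySem.Str.split₀ line).headD "" else ""))
  else if PySem.Str.startswith line "http" then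
    (results, current.insert "url" line)
  else
    (results, current.insert "text" ((current.getD "text" "") ++ " " ++ line))

def parse_birdx_text_py (text : String) : List (List (String × String)) :=
  -- text.strip().split("\n") : separator "\n" ≠ "", so split? is some (exact)
  let res := ((PySem.Str.split? (PySem.Str.strip text) "\n").getD []).foldl
      (fun st line0 => pvAStep st (PySem.Str.strip line0)) ([], PySem.Dict.empty)
  if res.2.items = [] then res.1 else res.1 ++ [res.2.items]

-- ===== PORT B =====
-- grouping-loop body: append a non-blank line to the open block, flush the block on a blank line
def pvGroupStep (st : List (List String) × List String) (line : String) :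
    List (List String) × List String :=
  if line ≠ "" then (st.1, st.2 ++ [line])
  else if st.2 ≠ [] then (st.1 ++ [st.2], [])
  else st

-- _parse_block's loop body
def pvTweetUpd (tweet : PySem.Dict String String) (line : String) : PySem.Dict String String :=
  if PySem.Str.startswith line "@" then
    tweet.insert "author" ((PySem.Str.split₀ line).headD "")  -- line.split()[0]; non-empty here (exact)
  else if PySem.Str.startswith line "http" then
    tweet.insert "url" line
  else
    tweet.insert "text" ((tweet.getD "text" "") ++ " " ++ line)

def pvParseBlock (lines : List String) : List (String × String) :=
  (lines.foldl pvTweetUpd PySem.Dict.empty).items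

def parse_birdx_text_py_alt (text : String) : List (List (String × String)) :=
  let st := ((PySem.Str.split? (PySem.Str.strip text) "\n").getD []).foldl
      (fun st raw => pvGroupStep st (PySem.Str.strip raw)) ([], [])
  let blocks := if st.2 ≠ [] then st.1 ++ [st.2] else st.1
  blocks.map pvParseBlock

-- ===== PRECONDITION & SPEC =====
def Spec_parse_birdx_text_py (text : String) (out : List (List (String × String))) : Prop := out = parse_birdx_text_py_alt text
instance (text : String) (out : List (List (String × String))) : Decidable (Spec_parse_birdx_text_py text out) := by unfold Spec_parse_birdx_text_py; infer_instance

-- ===== CLAIM (what is proved, stated in full; the proofs are below) =====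
def Claim_equal_parse_birdx_text_py : Prop := ∀ (text : String), Dom_parse_birdx_text_py text → Spec_parse_birdx_text_py text (parse_birdx_text_py text)

-- ===== LEMMAS AND PROOFS =====

-- A's final flush
def pvFinish (st : List (List (String × String)) × PySem.Dict String String) :
    List (List (String × String)) :=
  if st.2.items = [] then st.1 else st.1 ++ [st.2.items]

-- B's final flush and block parse
def pvBFinish (st : List (List String) × List String) : List (List (String × String)) :=
  (if st.2 ≠ [] then st.1 ++ [st.2] else st.1).map pvParseBlock

theorem pvInsert_items_ne_nil {κ ν : Type} [BEq κ] (d : PySem.Dict κ ν) (k : κ) (v : ν) :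
    (d.insert k v).items ≠ [] := by
  simp only [PySem.Dict.insert]
  split
  · rename_i hc
    intro h
    simp only [List.map_eq_nil_iff] at h
    rw [PySem.Dict.contains, h] at hc
    simp at hc
  · simp

theorem pvTweetUpd_items_ne_nil (d : PySem.Dict String String) (l : String) :
    (pvTweetUpd d l).items ≠ [] := by
  unfold pvTweetUpd; split_ifs <;> apply pvInsert_items_ne_nil

theorem pvFoldl_upd_ne_nil (p : List String) (d : PySem.Dict String String)
    (hd : d.items ≠ []) : (p.foldl pvTweetUpd d).items ≠ [] := by
  induction p generalizing d with
  | nil => exact hd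
  | cons l p ih => exact ih _ (pvTweetUpd_items_ne_nil d l)

theorem pvFoldl_upd_nil_iff (p : List String) :
    (p.foldl pvTweetUpd PySem.Dict.empty).items = [] ↔ p = [] := by
  cases p with
  | nil => simp [PySem.Dict.empty]
  | cons l p =>
    simp only [List.foldl_cons]
    constructor
    · intro h
      exact absurd h (pvFoldl_upd_ne_nil p _ (pvTweetUpd_items_ne_nil _ l))
    · intro h; cases h

theorem pvAStep_blank_flush (rs : List (List (String × String)))
    (cur : PySem.Dict String String) (hc : cur.items ≠ []) :
    pvAStep (rs, cur) "" = (rs ++ [cur.items], PySem.Dict.empty) := by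
  simp [pvAStep, hc]

theorem pvAStep_blank_keep (rs : List (List (String × String)))
    (cur : PySem.Dict String String) (hc : cur.items = []) :
    pvAStep (rs, cur) "" = (rs, cur) := by
  simp [pvAStep, hc]

theorem pvAStep_line (rs : List (List (String × String)))
    (cur : PySem.Dict String String) (l : String) (hl : l ≠ "") :
    pvAStep (rs, cur) l = (rs, pvTweetUpd cur l) := by
  simp only [pvAStep, pvTweetUpd, hl]
  split_ifs <;> simp_all

-- state alignment: A's (results, current) is B's (blocks, block) under map/parse
theorem pvAlign (ms : List String) (blocks : List (List String)) (block : List String) :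
    pvFinish (ms.foldl pvAStep
        (blocks.map pvParseBlock, block.foldl pvTweetUpd PySem.Dict.empty))
      = pvBFinish (ms.foldl pvGroupStep (blocks, block)) := by
  induction ms generalizing blocks block with
  | nil =>
    simp only [List.foldl_nil, pvFinish, pvBFinish, pvFoldl_upd_nil_iff]
    by_cases hb : block = [] <;> simp [hb, pvParseBlock]
  | cons l ms ih =>
    simp only [List.foldl_cons]
    by_cases hl : l = ""
    · subst hl
      by_cases hb : block = []
      · subst hb
        rw [pvAStep_blank_keep _ _ (by simp [PySem.Dict.empty])]
        rw [show pvGroupStep (blocks, ([] : List String)) "" = (blocks, []) from by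
          simp [pvGroupStep]]
        exact ih blocks []
      · rw [pvAStep_blank_flush _ _ (by simpa [pvFoldl_upd_nil_iff] using hb)]
        rw [show pvGroupStep (blocks, block) "" = (blocks ++ [block], []) from by
          simp [pvGroupStep, hb]]
        have h := ih (blocks ++ [block]) []
        simpa [pvParseBlock] using h
    · rw [pvAStep_line _ _ l hl]
      rw [show pvGroupStep (blocks, block) l = (blocks, block ++ [l]) from by
        simp [pvGroupStep, hl]]
      have h := ih blocks (block ++ [l])
      rw [List.foldl_append] at h
      simpa using h

-- ===== VERDICT (by name: the statement is the Claim_ definition above) =====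
theorem parse_birdx_text_py_spec : Claim_equal_parse_birdx_text_py := by
  intro text _
  unfold Spec_parse_birdx_text_py parse_birdx_text_py parse_birdx_text_py_alt
  show pvFinish (((PySem.Str.split? (PySem.Str.strip text) "\n").getD []).foldl
      (fun st line0 => pvAStep st (PySem.Str.strip line0)) ([], PySem.Dict.empty)) = _
  rw [← List.foldl_map (f := PySem.Str.strip) (g := pvAStep),
      ← List.foldl_map (f := PySem.Str.strip) (g := pvGroupStep)]
  have h := pvAlign (((PySem.Str.split? (PySem.Str.strip text) "\n").getD []).map PySem.Str.strip) [] []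
  simpa [pvBFinish] using h
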